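-- pv_equiv track=rewrite | github.com/LLian7/Sig_artifact | benchmark_treeawareVisp/treeaware_isp.py | _residual_block_lengths
-- ===== SOURCE A (Python) =====
-- def _residual_block_lengths(residual_rows: int, bt_block_size: int) -> tuple[int, ...]:
--     if residual_rows < 0:
--         raise ValueError("residual_rows must be non-negative")
--     if residual_rows == 0:
--         return ()
--     if bt_block_size <= 0:
--         return ()
--     lengths = []
--     remaining = residual_rows
--     while remaining > 0:
--         block_len = min(bt_block_size, remaining)
--         lengths.append(block_len)
--         remaining -= block_len
--     return tuple(lengths)
-- ===== SOURCE B (Python) =====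
-- def _residual_block_lengths(residual_rows: int, bt_block_size: int) -> tuple[int, ...]:
--     if residual_rows < 0:
--         raise ValueError("residual_rows must be non-negative")
--     if residual_rows == 0:
--         return ()
--     if bt_block_size <= 0:
--         return ()
--     full, rem = divmod(residual_rows, bt_block_size)
--     return tuple([bt_block_size] * full + ([rem] if rem else []))
-- ===== Notes on version B (the rewrite author's own statement) =====
-- stated objective: simpler
-- what changed: Replaces the subtract-until-zero while loop that appends one block length per iteration with a single divmod: the answer is [bt_block_size]*full plus the nonzero remainder, built in one list construction.
import Mathlib
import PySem

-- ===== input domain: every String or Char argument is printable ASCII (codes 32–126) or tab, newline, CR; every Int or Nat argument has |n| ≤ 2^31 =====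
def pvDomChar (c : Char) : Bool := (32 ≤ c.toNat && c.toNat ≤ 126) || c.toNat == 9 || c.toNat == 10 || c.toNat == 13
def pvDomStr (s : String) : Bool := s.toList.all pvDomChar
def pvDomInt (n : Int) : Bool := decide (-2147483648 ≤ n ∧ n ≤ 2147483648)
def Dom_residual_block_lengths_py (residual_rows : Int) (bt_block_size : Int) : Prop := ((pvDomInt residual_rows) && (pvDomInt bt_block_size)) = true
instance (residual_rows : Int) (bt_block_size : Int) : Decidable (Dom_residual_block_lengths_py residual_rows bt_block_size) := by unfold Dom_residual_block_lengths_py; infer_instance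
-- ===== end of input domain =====

-- B replaces A's subtract-until-zero loop with one divmod and a single list construction (objective: simpler).

-- ===== PORT A =====
-- the while loop: remaining > 0 → append min(bt, remaining), subtract it; hbt makes termination provable (invariant of the caller)
def pvLoopA (bt : Int) (hbt : 0 < bt) (remaining : Int) (acc : List Int) : List Int :=
  if h : 0 < remaining then
    pvLoopA bt hbt (remaining - min bt remaining) (acc ++ [min bt remaining])
  else acc
termination_by remaining.toNat
decreasing_by omega

def residual_block_lengths_py (residual_rows : Int) (bt_block_size : Int) : List Int :=
  if residual_rows < 0 then []          -- Python raises ValueError here; excluded by Pre_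
  else if residual_rows = 0 then []
  else if h : bt_block_size ≤ 0 then []
  else pvLoopA bt_block_size (by omega) residual_rows []

-- ===== PORT B =====
def residual_block_lengths_py_alt (residual_rows : Int) (bt_block_size : Int) : List Int :=
  if residual_rows < 0 then []          -- Python raises ValueError here; excluded by Pre_
  else if residual_rows = 0 then []
  else if bt_block_size ≤ 0 then []
  else
    let full := PySem.Int.floordiv residual_rows bt_block_size
    let rem := PySem.Int.mod residual_rows bt_block_size
    List.replicate full.toNat bt_block_size ++ (if rem ≠ 0 then [rem] else [])

-- ===== PRECONDITION & SPEC =====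
-- Pre_ excludes exactly residual_rows < 0, where A raises ValueError.
def Pre_residual_block_lengths_py (residual_rows : Int) (_bt_block_size : Int) : Prop :=
  0 ≤ residual_rows
instance (residual_rows : Int) (bt_block_size : Int) : Decidable (Pre_residual_block_lengths_py residual_rows bt_block_size) := by unfold Pre_residual_block_lengths_py; infer_instance

def pvWitness_residual_block_lengths_py : Int × Int := (7, 3)

def Spec_residual_block_lengths_py (residual_rows : Int) (bt_block_size : Int) (out : List Int) : Prop := out = residual_block_lengths_py_alt residual_rows bt_block_size
instance (residual_rows : Int) (bt_block_size : Int) (out : List Int) : Decidable (Spec_residual_block_lengths_py residual_rows bt_block_size out) := by unfold Spec_residual_block_lengths_py; infer_instance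

-- ===== CLAIM (what is proved, stated in full; the proofs are below) =====
def Claim_equal_residual_block_lengths_py : Prop := ∀ (residual_rows : Int) (bt_block_size : Int), Dom_residual_block_lengths_py residual_rows bt_block_size → Pre_residual_block_lengths_py residual_rows bt_block_size → Spec_residual_block_lengths_py residual_rows bt_block_size (residual_block_lengths_py residual_rows bt_block_size)

-- ===== LEMMAS AND PROOFS =====

-- closed form of B's non-guard branch
def pvClosed (r b : Int) : List Int :=
  List.replicate (PySem.Int.floordiv r b).toNat b ++ (if PySem.Int.mod r b ≠ 0 then [PySem.Int.mod r b] else [])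

theorem pvClosed_zero (b : Int) (hb : 0 < b) : pvClosed 0 b = [] := by
  simp [pvClosed, PySem.Int.floordiv_eq_ediv_of_pos hb, PySem.Int.mod_eq_emod_of_pos hb]

theorem pvClosed_small (b : Int) (hb : 0 < b) (r : Int) (h0 : 0 < r) (hrb : r ≤ b) :
    pvClosed r b = [r] := by
  rcases eq_or_lt_of_le hrb with he | hlt
  · subst he
    simp [pvClosed, PySem.Int.floordiv_eq_ediv_of_pos hb, PySem.Int.mod_eq_emod_of_pos hb,
      Int.ediv_self (by omega : r ≠ 0)]
  · have hne : r ≠ 0 := by omega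
    simp [pvClosed, PySem.Int.floordiv_eq_ediv_of_pos hb, PySem.Int.mod_eq_emod_of_pos hb,
      Int.ediv_eq_zero_of_lt (by omega) hlt, Int.emod_eq_of_lt (by omega) hlt, hne]

theorem pvClosed_step (b : Int) (hb : 0 < b) (r : Int) (h : b < r) :
    pvClosed r b = b :: pvClosed (r - b) b := by
  have hq : PySem.Int.floordiv r b = PySem.Int.floordiv (r - b) b + 1 := by
    rw [PySem.Int.floordiv_eq_ediv_of_pos hb, PySem.Int.floordiv_eq_ediv_of_pos hb]
    have := Int.add_mul_ediv_right (r - b) 1 (by omega : b ≠ 0)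
    have h2 : r - b + 1 * b = r := by ring
    rw [h2] at this
    omega
  have hm : PySem.Int.mod r b = PySem.Int.mod (r - b) b := by
    rw [PySem.Int.mod_eq_emod_of_pos hb, PySem.Int.mod_eq_emod_of_pos hb]
    have := Int.sub_emod_right r b
    omega
  have hq0 : 0 ≤ PySem.Int.floordiv (r - b) b := by
    rw [PySem.Int.floordiv_eq_ediv_of_pos hb]
    exact Int.ediv_nonneg (by omega) (by omega)
  have htn : (PySem.Int.floordiv (r - b) b + 1).toNat
      = (PySem.Int.floordiv (r - b) b).toNat + 1 := by omega
  simp only [pvClosed, hq, hm, htn, List.replicate_succ, List.cons_append]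

theorem pvLoopA_closed (b : Int) (hb : 0 < b) :
    ∀ (n : Nat) (r : Int), r.toNat = n → 0 ≤ r → ∀ acc, pvLoopA b hb r acc = acc ++ pvClosed r b := by
  intro n
  induction n using Nat.strong_induction_on with
  | _ n ih =>
    intro r hn hr acc
    rw [pvLoopA]
    split_ifs with h
    · set m := min b r with hm
      have hm1 : 0 < m := by omega
      have hmr : m ≤ r := by omega
      rw [ih (r - m).toNat (by omega) (r - m) rfl (by omega)]
      by_cases hrb : r ≤ b
      · have hmr' : m = r := by omega
        rw [hmr']
        simp [pvClosed_zero b hb, pvClosed_small b hb r h hrb]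
      · have hbr : b < r := by omega
        have hmb : m = b := by omega
        rw [hmb, pvClosed_step b hb r hbr]
        simp
    · have : r = 0 := by omega
      subst this
      simp [pvClosed_zero b hb]

theorem residual_block_lengths_py_spec : Claim_equal_residual_block_lengths_py := by
  intro r b _ hpre
  unfold Spec_residual_block_lengths_py residual_block_lengths_py residual_block_lengths_py_alt
  split_ifs with h1 h2 h3 <;> try rfl
  · rw [pvLoopA_closed b (by omega) r.toNat r rfl hpre []]
    simp [pvClosed]
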